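-- pv_equiv track=rewrite | github.com/katrinafyi/codejam-2023 | 11_mocking_attempt1_score1.0.py | Mocking
-- ===== SOURCE A (Python) =====
-- def Mocking(n, d, m):
--     s = ''
--     for x,c in enumerate(m):
--         if any(x % dd == 0 for dd in d):
--             if c == c.upper():
--                 s += c.lower()
--             else:
--                 s += c.upper()
--         else:
--             s += c
--     return s
-- ===== SOURCE B (Python) =====
-- def Mocking(n, d, m):
--     # Sieve: mark the indices to flip by walking multiples of each divisor,
--     # instead of testing every divisor at every index. Zero divisors are
--     # skipped (a step-0 range is meaningless; 0 marks no multiples).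
--     flip = set()
--     for dd in d:
--         if dd != 0:
--             flip.update(range(0, len(m), abs(dd)))
--     out = []
--     for i, c in enumerate(m):
--         if i in flip:
--             out.append(c.lower() if c == c.upper() else c.upper())
--         else:
--             out.append(c)
--     return ''.join(out)
-- ===== Notes on version B (the rewrite author's own statement) =====
-- stated objective: faster
-- what changed: Instead of testing every divisor at every character index (any(x % dd == 0 for dd in d)), B sieves: it walks the multiples of each nonzero divisor once to build the set of indices to flip, then maps over the string with a set lookup.
-- outside the precondition, e.g. on Mocking(0, [1, 0], 'ab'): A returns 'AB', B returns 'AB'; on Mocking(0, [0], 'ab'): A raises ZeroDivisionError, B returns 'ab'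
import Mathlib
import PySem

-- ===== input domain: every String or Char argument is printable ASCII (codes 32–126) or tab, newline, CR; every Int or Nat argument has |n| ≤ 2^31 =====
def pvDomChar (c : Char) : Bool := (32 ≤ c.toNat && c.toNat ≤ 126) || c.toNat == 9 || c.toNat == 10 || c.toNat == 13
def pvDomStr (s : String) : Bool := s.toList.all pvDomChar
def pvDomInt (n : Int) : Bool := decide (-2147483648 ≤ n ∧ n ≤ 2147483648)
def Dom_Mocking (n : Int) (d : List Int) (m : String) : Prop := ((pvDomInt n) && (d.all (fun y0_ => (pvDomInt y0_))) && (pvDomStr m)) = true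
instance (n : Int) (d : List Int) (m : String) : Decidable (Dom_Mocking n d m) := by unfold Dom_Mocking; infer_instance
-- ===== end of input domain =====

-- B replaces A's per-index scan of all divisors by a sieve: it marks the multiples of
-- each nonzero divisor once in a set, then flips exactly the marked indices (faster in a timing run).


-- ===== PORT A =====
def Mocking (n : Int) (d : List Int) (m : String) : String :=
  String.mk ((PySem.List.enumerate m.toList).foldl (fun s xc =>
    if d.any (fun dd => PySem.Int.mod xc.1 dd == 0) then
      if xc.2 == PySem.Chars.upperChar xc.2 then s ++ [PySem.Chars.lowerChar xc.2]
      else s ++ [PySem.Chars.upperChar xc.2]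
    else s ++ [xc.2]) [])

-- ===== PORT B =====
-- Python's c == c.upper() / c.lower() / c.upper() on a one-character string, as a Char step
def pvFlipChar (c : Char) : Char :=
  if c == PySem.Chars.upperChar c then PySem.Chars.lowerChar c else PySem.Chars.upperChar c

def Mocking_alt (n : Int) (d : List Int) (m : String) : String :=
  let L : Int := PySem.Str.len m
  let flip : PySem.Set Int :=
    d.foldl (fun s dd =>
      if dd == 0 then s else PySem.Set.update s (PySem.List.pyRange 0 L |dd|)) PySem.Set.empty
  String.mk ((PySem.List.enumerate m.toList).map (fun ic =>
    if PySem.Set.contains flip ic.1 then pvFlipChar ic.2 else ic.2))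

-- ===== PRECONDITION & SPEC =====
-- Pre_ excludes divisor lists containing 0 with a non-empty m: there Python A's
-- any(x % dd == 0 …) raises ZeroDivisionError (unless every index happens to be divided by
-- a divisor listed before the 0, a short-circuit artefact of A's scan order). On the empty
-- string A returns '' for any d, and so does B (it skips zero divisors), so that stays inside.
def Pre_Mocking (n : Int) (d : List Int) (m : String) : Prop := (0 : Int) ∈ d → m = ""
instance (n : Int) (d : List Int) (m : String) : Decidable (Pre_Mocking n d m) := by unfold Pre_Mocking; infer_instance
def pvWitness_Mocking : Int × List Int × String := (0, [2, 3], "Hello, World!")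

def Spec_Mocking (n : Int) (d : List Int) (m : String) (out : String) : Prop := out = Mocking_alt n d m
instance (n : Int) (d : List Int) (m : String) (out : String) : Decidable (Spec_Mocking n d m out) := by unfold Spec_Mocking; infer_instance

-- ===== CLAIM (what is proved, stated in full; the proofs are below) =====
def Claim_equal_Mocking : Prop := ∀ (n : Int) (d : List Int) (m : String), Dom_Mocking n d m → Pre_Mocking n d m → Spec_Mocking n d m (Mocking n d m)

-- ===== LEMMAS AND PROOFS =====

-- A's loop, which appends one character per element, is the map of its per-element step.
theorem mocking_foldl_eq_map (d : List Int) :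
    ∀ (l : List (Int × Char)) (acc : List Char),
      (l.foldl (fun s xc =>
        if d.any (fun dd => PySem.Int.mod xc.1 dd == 0) then
          if xc.2 == PySem.Chars.upperChar xc.2 then s ++ [PySem.Chars.lowerChar xc.2]
          else s ++ [PySem.Chars.upperChar xc.2]
        else s ++ [xc.2]) acc)
      = acc ++ l.map (fun xc =>
          if d.any (fun dd => PySem.Int.mod xc.1 dd == 0) then pvFlipChar xc.2 else xc.2) := by
  intro l
  induction l with
  | nil => intro acc; simp
  | cons hd tl ih =>
    intro acc
    simp only [List.foldl_cons, List.map_cons, ih]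
    unfold pvFlipChar
    split_ifs <;> simp

-- membership in the sieve set built by B (zero divisors contribute nothing)
theorem mem_flip_foldl (L : Int) :
    ∀ (d : List Int) (s0 : PySem.Set Int) (x : Int),
      (x ∈ d.foldl (fun s dd =>
          if dd == 0 then s else PySem.Set.update s (PySem.List.pyRange 0 L |dd|)) s0)
      ↔ x ∈ s0 ∨ ∃ dd ∈ d, dd ≠ 0 ∧ x ∈ PySem.List.pyRange 0 L |dd| := by
  intro d
  induction d with
  | nil => intro s0 x; simp
  | cons hd tl ih =>
    intro s0 x
    by_cases h0 : hd = 0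
    · subst h0
      simp only [List.foldl_cons, beq_self_eq_true, if_true, ih]
      constructor
      · rintro (h | ⟨dd, hdd, hne, hx⟩)
        · exact Or.inl h
        · exact Or.inr ⟨dd, List.mem_cons_of_mem _ hdd, hne, hx⟩
      · rintro (h | ⟨dd, hdd, hne, hx⟩)
        · exact Or.inl h
        · rcases List.mem_cons.mp hdd with rfl | hdd
          · exact absurd rfl hne
          · exact Or.inr ⟨dd, hdd, hne, hx⟩
    · have hb : (hd == 0) = false := beq_eq_false_iff_ne.mpr h0
      simp only [List.foldl_cons, hb, Bool.false_eq_true, if_false, ih, PySem.Set.mem_update]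
      constructor
      · rintro ((h | h) | ⟨dd, hdd, hne, hx⟩)
        · exact Or.inl h
        · exact Or.inr ⟨hd, List.mem_cons_self .., h0, h⟩
        · exact Or.inr ⟨dd, List.mem_cons_of_mem _ hdd, hne, hx⟩
      · rintro (h | ⟨dd, hdd, hne, hx⟩)
        · exact Or.inl (Or.inl h)
        · rcases List.mem_cons.mp hdd with rfl | hdd
          · exact Or.inl (Or.inr hx)
          · exact Or.inr ⟨dd, hdd, hne, hx⟩

-- the sieve lookup agrees with A's per-index divisor scan, for 0 ≤ x < L and 0 ∉ d
theorem contains_flip_eq_any (L : Int) (d : List Int) (hd : (0 : Int) ∉ d)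
    (x : Int) (hx0 : 0 ≤ x) (hxL : x < L) :
    PySem.Set.contains
      (d.foldl (fun s dd =>
        if dd == 0 then s else PySem.Set.update s (PySem.List.pyRange 0 L |dd|)) PySem.Set.empty) x
    = d.any (fun dd => PySem.Int.mod x dd == 0) := by
  rcases h : d.any (fun dd => PySem.Int.mod x dd == 0) with _ | _
  · rw [List.any_eq_false] at h
    apply Bool.eq_false_iff.mpr
    intro hc
    rw [PySem.Set.contains_iff, mem_flip_foldl] at hc
    rcases hc with hc | ⟨dd, hdd, hne, hmem⟩
    · simp [PySem.Set.empty] at hc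
    · have habs : (0 : Int) < |dd| := abs_pos.mpr hne
      rw [PySem.List.mem_pyRange_iff_of_pos habs] at hmem
      have hdvd : dd ∣ x := (abs_dvd dd x).mp (by simpa using hmem.2.2)
      exact h dd hdd (by simp [(PySem.Int.mod_eq_zero_iff_dvd x dd).mpr hdvd])
  · rw [List.any_eq_true] at h
    rcases h with ⟨dd, hdd, hmod⟩
    have hdd0 : dd ≠ 0 := fun h0 => hd (h0 ▸ hdd)
    have habs : (0 : Int) < |dd| := abs_pos.mpr hdd0
    have hdvd : dd ∣ x := (PySem.Int.mod_eq_zero_iff_dvd x dd).mp (by simpa using hmod)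
    rw [PySem.Set.contains_iff, mem_flip_foldl]
    exact Or.inr ⟨dd, hdd, hdd0, (PySem.List.mem_pyRange_iff_of_pos habs x).mpr
      ⟨hx0, hxL, by simpa using (abs_dvd dd x).mpr hdvd⟩⟩

-- ===== VERDICT (by name: the statement is the Claim_ definition above) =====
theorem Mocking_spec : Claim_equal_Mocking := by
  intro n d m _ hpre
  unfold Spec_Mocking Mocking Mocking_alt
  by_cases h0 : (0 : Int) ∈ d
  · -- then m = "", both sides are the empty string
    rw [hpre h0]
    simp [PySem.List.enumerate]
  · rw [mocking_foldl_eq_map]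
    simp only [List.nil_append]
    congr 1
    apply List.map_congr_left
    intro ic hic
    rw [PySem.List.enumerate_eq_map_pyRange m.toList ' '] at hic
    rcases List.mem_map.mp hic with ⟨j, hj, rfl⟩
    have hjb := (PySem.List.mem_pyRange_one).mp hj
    have hL : PySem.Str.len m = PySem.List.len m.toList := by
      simp [PySem.Str.len_eq, PySem.List.len]
    rw [hL, contains_flip_eq_any _ d h0 j hjb.1 hjb.2]
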